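-- pv_equiv track=rewrite | github.com/Ignatella/AGH | SEM_1/python/Ex 2018/remove_relatively_first_chain/main.py | are_first
-- ===== SOURCE A (Python) =====
-- def are_first(a, b):
--     if a == 1 or b == 1:
--         return False
--
--     while a > 0:
--         tmp = a
--         a = b % a
--         b = tmp
--
--     if b == 1:
--         return True
--     return False
-- ===== SOURCE B (Python) =====
-- def are_first(a, b):
--     # coprimality test via the binary (Stein) gcd instead of Euclid's division loop
--     if a <= 0 or a == 1 or b == 1:
--         return False
--     x, y = a, abs(b)
--     if y == 0:
--         return False              # gcd(a, 0) = a >= 2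
--     if x % 2 == 0 and y % 2 == 0:
--         return False              # both even: gcd divisible by 2
--     while x > 0:
--         if x % 2 == 0:
--             x //= 2
--         elif y % 2 == 0:
--             y //= 2
--         elif x >= y:
--             x -= y
--         else:
--             y -= x
--     return y == 1
-- ===== Notes on version B (the rewrite author's own statement) =====
-- stated objective: alternative
-- what changed: A's division-based Euclid while-loop is replaced by the binary (Stein) gcd: early guards for non-positive a, b == 0 and both-even inputs, then a halve/subtract loop on (a, abs(b)) with no division or modulo, finally comparing the surviving value with 1.
import Mathlib
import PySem

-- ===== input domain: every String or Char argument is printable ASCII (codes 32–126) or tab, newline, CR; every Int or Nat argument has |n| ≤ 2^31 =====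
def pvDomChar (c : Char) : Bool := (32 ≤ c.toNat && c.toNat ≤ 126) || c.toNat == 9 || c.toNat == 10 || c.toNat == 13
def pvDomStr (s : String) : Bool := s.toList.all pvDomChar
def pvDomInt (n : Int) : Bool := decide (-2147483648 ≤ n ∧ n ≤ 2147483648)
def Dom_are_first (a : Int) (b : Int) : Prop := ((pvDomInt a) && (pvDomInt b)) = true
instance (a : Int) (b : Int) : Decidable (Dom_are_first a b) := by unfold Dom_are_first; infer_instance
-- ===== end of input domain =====

-- B tests coprimality with the binary (Stein) gcd — guards plus a halve/subtract loop on (a, abs(b)) — instead of A's division-based Euclid while-loop; objective: alternative algorithm, similar cost.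


-- ===== PORT A =====
-- A's while loop: while a > 0: tmp = a; a = b % a; b = tmp — returns the final b
def areFirstLoop (a b : Int) : Int :=
  if h : a > 0 then
    let tmp := a
    areFirstLoop (PySem.Int.mod b a) tmp
  else b
termination_by a.toNat
decreasing_by
  have h0 : 0 ≤ PySem.Int.mod b a := PySem.Int.mod_nonneg b h
  have h1 : PySem.Int.mod b a < a := PySem.Int.mod_lt b h
  omega

def are_first (a : Int) (b : Int) : Bool :=
  if a == 1 || b == 1 then false
  else
    let b' := areFirstLoop a b
    if b' == 1 then true else false

-- ===== PORT B =====
-- B's halve/subtract (Stein) loop: while x > 0: halve the even partner (the other one is odd)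
-- or subtract the smaller from the larger; returns the final y.  The extra fuel argument
-- (called with x + y) only makes the recursion total: while 0 < y each iteration strictly
-- decreases x + y, so fuel x + y is never exhausted.
def steinLoop : Nat → Nat → Nat → Nat
  | 0, _, y => y
  | f + 1, x, y =>
    if x = 0 then y
    else if x % 2 = 0 then steinLoop f (x / 2) y
    else if y % 2 = 0 then steinLoop f x (y / 2)
    else if y ≤ x then steinLoop f (x - y) y
    else steinLoop f x (y - x)

def are_first_alt (a : Int) (b : Int) : Bool :=
  if a ≤ 0 ∨ a = 1 ∨ b = 1 then false
  else
    let x := a.toNat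
    let y := b.natAbs
    if y = 0 then false
    else if x % 2 = 0 ∧ y % 2 = 0 then false
    else decide (steinLoop (x + y) x y = 1)

-- ===== PRECONDITION & SPEC =====
def Spec_are_first (a : Int) (b : Int) (out : Bool) : Prop := out = are_first_alt a b
instance (a : Int) (b : Int) (out : Bool) : Decidable (Spec_are_first a b out) := by unfold Spec_are_first; infer_instance

-- ===== CLAIM (what is proved, stated in full; the proofs are below) =====
def Claim_equal_are_first : Prop := ∀ (a : Int) (b : Int), Dom_are_first a b → Spec_are_first a b (are_first a b)

-- ===== LEMMAS AND PROOFS =====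

-- halving the even partner of an odd number preserves the gcd
theorem gcd_half_left (x y : Nat) (hx : 2 ∣ x) (hy : ¬ 2 ∣ y) : Nat.gcd (x / 2) y = Nat.gcd x y := by
  obtain ⟨m, rfl⟩ := hx
  rw [Nat.mul_div_cancel_left m (by norm_num)]
  exact (Nat.Coprime.gcd_mul_left_cancel m
    ((Nat.coprime_two_left).mpr (Nat.odd_iff.mpr (by omega)))).symm

theorem gcd_half_right (x y : Nat) (hy : 2 ∣ y) (hx : ¬ 2 ∣ x) : Nat.gcd x (y / 2) = Nat.gcd x y := by
  rw [Nat.gcd_comm, gcd_half_left y x hy hx, Nat.gcd_comm]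

-- with enough fuel and the not-both-even invariant, B's loop computes the gcd
theorem steinLoop_eq_gcd : ∀ (f x y : Nat), 0 < y → ¬ (2 ∣ x ∧ 2 ∣ y) → x + y ≤ f →
    steinLoop f x y = Nat.gcd x y := by
  intro f
  induction f with
  | zero => intro x y hy _ hf; omega
  | succ f ih =>
    intro x y hy hinv hf
    rw [steinLoop]
    by_cases hx0 : x = 0
    · simp [hx0]
    rw [if_neg hx0]
    by_cases hxe : x % 2 = 0
    · have hx2 : 2 ∣ x := Nat.dvd_of_mod_eq_zero hxe
      have hyo : ¬ 2 ∣ y := fun h => hinv ⟨hx2, h⟩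
      have hlt : x / 2 < x := Nat.div_lt_self (by omega) (by norm_num)
      rw [if_pos hxe, ih (x / 2) y hy (fun h => hyo h.2) (by omega)]
      exact gcd_half_left x y hx2 hyo
    · rw [if_neg hxe]
      have hxo : ¬ 2 ∣ x := fun h => hxe (Nat.mod_eq_zero_of_dvd h)
      by_cases hye : y % 2 = 0
      · have hy2 : 2 ∣ y := Nat.dvd_of_mod_eq_zero hye
        have hlt : y / 2 < y := Nat.div_lt_self hy (by norm_num)
        have hyp : 0 < y / 2 := by
          obtain ⟨m, rfl⟩ := hy2
          rw [Nat.mul_div_cancel_left m (by norm_num)]; omega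
        rw [if_pos hye, ih x (y / 2) hyp (fun h => hxo h.1) (by omega)]
        exact gcd_half_right x y hy2 hxo
      · rw [if_neg hye]
        by_cases hle : y ≤ x
        · rw [if_pos hle, ih (x - y) y hy (fun h => hye (Nat.mod_eq_zero_of_dvd h.2)) (by omega)]
          exact Nat.gcd_sub_self_left hle
        · have hxy : x ≤ y := by omega
          rw [if_neg hle, ih x (y - x) (by omega) (fun h => hxe (Nat.mod_eq_zero_of_dvd h.1)) (by omega)]
          exact Nat.gcd_sub_self_right hxy

-- A's loop is Euclid's algorithm: for positive a it returns gcd(b, a)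
theorem loop_gcd (a b : Int) (ha : 0 < a) : areFirstLoop a b = ((Int.gcd b a : Nat) : Int) := by
  rw [areFirstLoop, dif_pos ha]
  have h0 : 0 ≤ PySem.Int.mod b a := PySem.Int.mod_nonneg b ha
  have h1 : PySem.Int.mod b a < a := PySem.Int.mod_lt b ha
  have hre : PySem.Int.mod b a = b % a := PySem.Int.mod_eq_emod_of_pos ha
  by_cases hrp : 0 < PySem.Int.mod b a
  · rw [loop_gcd (PySem.Int.mod b a) a hrp]
    congr 1
    rw [Int.gcd_comm, hre, Int.gcd_emod]
  · have hr0 : PySem.Int.mod b a = 0 := le_antisymm (not_lt.mp hrp) h0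
    rw [hr0, areFirstLoop, dif_neg (by omega)]
    have hdvd : a ∣ b := (PySem.Int.mod_eq_zero_iff_dvd b a).mp hr0
    have hg : Int.gcd b a = a.natAbs := Nat.gcd_eq_right (Int.natAbs_dvd_natAbs.mpr hdvd)
    rw [hg, Int.natAbs_of_nonneg (le_of_lt ha)]
termination_by a.toNat
decreasing_by omega

-- ===== VERDICT (by name: the statement is the Claim_ definition above) =====
theorem are_first_spec : Claim_equal_are_first := by
  unfold Claim_equal_are_first
  intro a b _
  unfold Spec_are_first are_first are_first_alt
  by_cases h1 : a = 1
  · simp [h1]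
  by_cases h2 : b = 1
  · simp [h1, h2]
  by_cases h3 : a ≤ 0
  · have hskip : areFirstLoop a b = b := by rw [areFirstLoop, dif_neg (by omega)]
    simp [h1, h2, h3, hskip]
  · have ha : 0 < a := lt_of_not_ge h3
    have ha2 : 2 ≤ a := by omega
    have hxa : a.toNat = a.natAbs := by omega
    have hgd : Int.gcd b a = Nat.gcd b.natAbs a.natAbs := rfl
    simp only [h1, h2, h3, if_false, beq_iff_eq, or_self]
    rw [loop_gcd a b ha]
    by_cases hy0 : b.natAbs = 0
    · have hb0 : b = 0 := by omega
      have : Int.gcd b a = a.natAbs := by rw [hb0]; exact Int.gcd_zero_left a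
      simp only [hy0, this]
      simp
      try exact ⟨h1, h2⟩
      try (intro _ _; rw [abs_of_pos ha]; omega)
    · rw [if_neg hy0]
      by_cases hev : a.toNat % 2 = 0 ∧ b.natAbs % 2 = 0
      · have hdg : 2 ∣ Nat.gcd b.natAbs a.natAbs :=
          Nat.dvd_gcd (Nat.dvd_of_mod_eq_zero hev.2) (hxa ▸ Nat.dvd_of_mod_eq_zero hev.1)
        have hne : Int.gcd b a ≠ 1 := by rw [hgd]; omega
        have : ((Int.gcd b a : Nat) : Int) ≠ 1 := by exact_mod_cast hne
        simp [hev, this]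
      · rw [if_neg hev]
        rw [steinLoop_eq_gcd (a.toNat + b.natAbs) a.toNat b.natAbs (by omega)
          (fun h => hev ⟨Nat.mod_eq_zero_of_dvd h.1, Nat.mod_eq_zero_of_dvd h.2⟩) le_rfl]
        rw [hgd, hxa, Nat.gcd_comm]
        by_cases hg1 : Nat.gcd b.natAbs a.natAbs = 1
        · have hgc : Nat.gcd a.natAbs b.natAbs = 1 := by rw [Nat.gcd_comm]; exact hg1
          simp [hgc]
          try exact ⟨h1, h2⟩
        · have hgc : Nat.gcd a.natAbs b.natAbs ≠ 1 := by rw [Nat.gcd_comm]; exact hg1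
          have hInt : ((Nat.gcd a.natAbs b.natAbs : Nat) : Int) ≠ 1 := by exact_mod_cast hgc
          simp [hgc, hInt]
          try exact ⟨h1, h2⟩
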